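-- pv_equiv track=rewrite | github.com/HelloSSIFI/HelloWorld | programmers/Lv3_불량_사용자/s1_KSoonYo.py | solution
-- ===== SOURCE A (Python) =====
-- def check(origin, banned_id):
--     if len(origin) != len(banned_id):
--         return False
--
--     temp = ''
--     for char_idx in range(len(banned_id)):
--         if banned_id[char_idx] == '*':
--             temp += '*'
--             continue
--         temp += origin[char_idx]
--
--     if temp == banned_id:
--         return True
--     return False
--
-- def dfs(table, idx, temp_set, banned_list, result, cnt = 0):
--     if len(temp_set) == len(banned_list) and temp_set not in result:
--         copied_set = temp_set.copy()
--         result.append(copied_set)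
--         cnt += 1
--         return cnt
--
--     if idx >= len(banned_list):
--         return cnt
--
--     for candidate in table[banned_list[idx]]:
--         if candidate not in temp_set:
--             temp_set.add(candidate)
--             cnt += dfs(table, idx + 1, temp_set, banned_list, result)
--             temp_set.remove(candidate)
--     return cnt
--
-- def solution(user_id, banned_id):
--     answer = 0
--     candidates_table = {}
--     result = []
--     for banned_user in banned_id:
--         if not candidates_table.get(banned_user):
--             candidates_table[banned_user] = []
--
--         for user in user_id:
--             if len(user) != len(banned_user):
--                 continue
--
--             if user in candidates_table[banned_user]:
--                 continue
--
--             if check(user, banned_user):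
--                 candidates_table[banned_user].append(user)
--     answer = dfs(candidates_table, 0, set(), banned_id, result)
--     return answer
-- ===== SOURCE B (Python) =====
-- def solution(user_id, banned_id):
--     def matches(u, b):
--         return len(u) == len(b) and all(bc == '*' or bc == uc for bc, uc in zip(b, u))
--
--     table = {}
--     for b in banned_id:
--         if b not in table:
--             table[b] = list(dict.fromkeys(u for u in user_id if matches(u, b)))
--
--     tuples = [[]]
--     for b in banned_id:
--         tuples = [t + [u] for t in tuples for u in table[b] if u not in t]
--
--     distinct = set()
--     for t in tuples:
--         distinct.add(frozenset(t))
--     return len(distinct)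
-- ===== Notes on version B (the rewrite author's own statement) =====
-- stated objective: simpler
-- what changed: A's recursive DFS with a mutable temp set, an in-place result list deduplicated by a linear 'not in result' scan, and a threaded counter is replaced by an iterative product enumeration (fold over banned_id building all distinct-user tuples) deduplicated through a set of frozensets, with the candidate table built by a filter plus dict.fromkeys dedup instead of A's re-scanning append loop.
import Mathlib
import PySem

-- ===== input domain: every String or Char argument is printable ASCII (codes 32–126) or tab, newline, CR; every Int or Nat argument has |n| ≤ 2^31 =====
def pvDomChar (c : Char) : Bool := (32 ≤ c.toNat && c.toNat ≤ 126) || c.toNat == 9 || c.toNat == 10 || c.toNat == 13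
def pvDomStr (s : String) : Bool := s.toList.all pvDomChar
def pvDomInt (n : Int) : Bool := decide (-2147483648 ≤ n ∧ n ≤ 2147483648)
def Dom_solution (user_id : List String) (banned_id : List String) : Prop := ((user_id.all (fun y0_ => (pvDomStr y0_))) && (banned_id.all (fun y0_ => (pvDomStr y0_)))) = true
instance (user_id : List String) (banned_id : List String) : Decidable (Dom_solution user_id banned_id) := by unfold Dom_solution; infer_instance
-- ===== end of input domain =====

-- B replaces A's recursive DFS (mutable set + linear 'not in result' scan + count threading) by an
-- iterative product enumeration deduplicated through a set of frozensets; objective: simpler.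

-- ===== PORT A =====
-- check(origin, banned_id): strings are handled at the character-list level (exact: Python's
-- s[i] on an in-range index is the char, '+' is append, '==' is list equality of the chars).
def pvCheckA (origin banned : String) : Bool :=
  if PySem.Str.len origin ≠ PySem.Str.len banned then false
  else
    let temp := (PySem.List.pyRange 0 (PySem.Str.len banned) 1).foldl
      (fun temp i =>
        if PySem.List.pyGetD banned.toList i ' ' == '*' then temp ++ ['*']
        else temp ++ [PySem.List.pyGetD origin.toList i ' ' ]) ([] : List Char)
    temp == banned.toList
-- dfs(table, idx, temp_set, banned_list, result, cnt=0): 'result' is mutated in place in Python,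
-- so the port threads it and returns (cnt, result).  The index walk 'idx, idx+1, …' is rendered
-- as the remaining suffix 'rem' of banned_list (idx ≥ len ↔ rem = []); 'table[banned_list[idx]]'
-- is Dict.getD with default [] (exact here: every key looked up was inserted by solution's loop).
-- 'temp_set not in result' is Python list membership by set equality.  The for-loop is pvForA.
mutual
def pvDfsA (table : PySem.Dict String (List String)) (bannedLen : Int)
    (rem : List String) (temp : PySem.Set String) (result : List (PySem.Set String)) :
    Int × List (PySem.Set String) :=
  if PySem.Set.len temp == bannedLen && !(result.any (fun s => PySem.Set.equal temp s)) then
    (1, result ++ [temp])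
  else
    match rem with
    | [] => (0, result)
    | b :: rest => pvForA table bannedLen rest (table.getD b []) temp result

def pvForA (table : PySem.Dict String (List String)) (bannedLen : Int)
    (rest : List String) (cands : List String) (temp : PySem.Set String)
    (result : List (PySem.Set String)) : Int × List (PySem.Set String) :=
  match cands with
  | [] => (0, result)
  | c :: cs =>
    if PySem.Set.contains temp c then pvForA table bannedLen rest cs temp result
    else
      let p := pvDfsA table bannedLen rest (PySem.Set.add temp c) result
      let q := pvForA table bannedLen rest cs temp p.2
      (p.1 + q.1, q.2)
end

def solution (user_id : List String) (banned_id : List String) : Int :=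
  let table := banned_id.foldl (fun tbl b =>
    let tbl := if (match tbl.get? b with | none => true | some l => l.isEmpty) then
        tbl.insert b ([] : List String) else tbl
    user_id.foldl (fun tbl u =>
      if PySem.Str.len u ≠ PySem.Str.len b then tbl
      else if (tbl.getD b []).contains u then tbl
      else if pvCheckA u b then tbl.modify b [] (fun l => l ++ [u])
      else tbl) tbl) PySem.Dict.empty
  (pvDfsA table (banned_id.length : Int) banned_id PySem.Set.empty []).1

-- ===== PORT B =====
def pvMatchesB (u b : String) : Bool :=
  PySem.Str.len u == PySem.Str.len b &&
    (b.toList.zip u.toList).all (fun p => p.1 == '*' || p.1 == p.2)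

def solution_alt (user_id : List String) (banned_id : List String) : Int :=
  let table := banned_id.foldl (fun tbl b =>
    if tbl.contains b then tbl
    else tbl.insert b (PySem.List.dedup (user_id.filter (fun u => pvMatchesB u b))))
    PySem.Dict.empty
  let tuples := banned_id.foldl (fun ts b =>
    ts.flatMap (fun t => (table.getD b []).flatMap
      (fun u => if t.contains u then [] else [t ++ [u]]))) [[]]
  -- Python's 'distinct' is a set of frozensets: ported by hand, step for step — membership is
  -- frozenset equality (Set.equal), exact because only the final size is used (order-independent).
  let distinct := tuples.foldl (fun ds t =>
    let fs := PySem.Set.ofList t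
    if ds.any (fun s => PySem.Set.equal fs s) then ds else ds ++ [fs])
    ([] : List (PySem.Set String))
  (distinct.length : Int)

-- ===== PRECONDITION & SPEC =====
def Spec_solution (user_id : List String) (banned_id : List String) (out : Int) : Prop := out = solution_alt user_id banned_id
instance (user_id : List String) (banned_id : List String) (out : Int) : Decidable (Spec_solution user_id banned_id out) := by unfold Spec_solution; infer_instance

-- ===== CLAIM (what is proved, stated in full; the proofs are below) =====
def Claim_equal_solution : Prop := ∀ (user_id : List String) (banned_id : List String), Dom_solution user_id banned_id → Spec_solution user_id banned_id (solution user_id banned_id)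

-- ===== LEMMAS AND PROOFS =====

-- the shared dedup-insert shape: fold sets into 'result', appending each set not already
-- present up to set equality
def pvInsertAll (result : List (PySem.Set String)) (ss : List (PySem.Set String)) :
    List (PySem.Set String) :=
  ss.foldl (fun r s => if r.any (fun x => PySem.Set.equal s x) then r else r ++ [s]) result

-- the multiset of full assignments reached by A's DFS from (rem, temp), in traversal order
def pvLeafSets (cand : String → List String) : List String → PySem.Set String → List (PySem.Set String)
  | [], temp => [temp]
  | b :: rest, temp => (cand b).flatMap
      (fun c => if PySem.Set.contains temp c then [] else pvLeafSets cand rest (PySem.Set.add temp c))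

-- the list of full tuples extending t, in B's product order
def pvProdExt (cand : String → List String) : List String → List String → List (List String)
  | [], t => [t]
  | b :: rest, t => (cand b).flatMap
      (fun u => if t.contains u then [] else pvProdExt cand rest (t ++ [u]))

lemma pvCheckA_len_ne {u b : String} (h : PySem.Str.len u ≠ PySem.Str.len b) :
    pvCheckA u b = false := by
  unfold pvCheckA; rw [if_pos h]

lemma pvTemp_eq (u b : String) (h : u.toList.length = b.toList.length) :
    (PySem.List.pyRange 0 (PySem.Str.len b) 1).foldl
      (fun temp i =>
        if PySem.List.pyGetD b.toList i ' ' == '*' then temp ++ ['*']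
        else temp ++ [PySem.List.pyGetD u.toList i ' ' ]) ([] : List Char)
    = List.zipWith (fun bc uc => if bc == '*' then '*' else uc) b.toList u.toList := by
  rw [PySem.Str.len_eq]
  have h1 : ∀ (l : List Int) (acc : List Char), l.foldl
      (fun temp i =>
        if PySem.List.pyGetD b.toList i ' ' == '*' then temp ++ ['*']
        else temp ++ [PySem.List.pyGetD u.toList i ' ' ]) acc
      = acc ++ l.map (fun i => if PySem.List.pyGetD b.toList i ' ' == '*' then '*'
          else PySem.List.pyGetD u.toList i ' ') := by
    intro l acc
    rw [← PySem.List.foldl_append_singleton_eq_map]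
    congr 1; funext t i; split <;> rfl
  rw [h1]
  apply List.ext_getElem
  · simp [PySem.List.length_pyRange_one, h]
  · intro k hk1 hk2
    have hkb : k < b.toList.length := by
      simpa [PySem.List.length_pyRange_one] using hk1
    have hku : k < u.toList.length := by omega
    simp only [List.nil_append, List.getElem_map, PySem.List.getElem_pyRange_one,
      List.getElem_zipWith, zero_add, PySem.List.pyGetD_natCast]
    rw [List.getD_eq_getElem _ _ hkb, List.getD_eq_getElem _ _ hku]

lemma pvZipAll : ∀ (bl ul : List Char), bl.length = ul.length →
    ((List.zipWith (fun bc uc => if bc == '*' then '*' else uc) bl ul) == bl)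
    = (bl.zip ul).all (fun p => p.1 == '*' || p.1 == p.2) := by
  intro bl
  induction bl with
  | nil => intro ul h; simp
  | cons bc bl' ih =>
    intro ul h
    cases ul with
    | nil => simp at h
    | cons uc ul' =>
      simp only [List.zipWith_cons_cons, List.zip_cons_cons, List.all_cons, List.cons_beq_cons]
      rw [ih ul' (by simpa using h)]
      by_cases hbc : bc = '*'
      · simp [hbc]
      · have hub : (uc == bc) = (bc == uc) := by
          rcases Bool.eq_false_or_eq_true (uc == bc) with h1 | h1 <;>
            rcases Bool.eq_false_or_eq_true (bc == uc) with h2 | h2 <;>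
              simp_all
        have h2 : (bc == '*') = false := by simp [hbc]
        simp [hub, h2]

-- check(u, b) computes exactly B's wildcard match
lemma pvCheckA_eq (u b : String) : pvCheckA u b = pvMatchesB u b := by
  by_cases h : PySem.Str.len u = PySem.Str.len b
  · have hlen : u.toList.length = b.toList.length := by
      have h' := h; rw [PySem.Str.len_eq, PySem.Str.len_eq] at h'; exact_mod_cast h'
    unfold pvCheckA pvMatchesB
    rw [if_neg (by simpa using h)]
    rw [pvTemp_eq u b hlen, pvZipAll _ _ hlen.symm]
    have ht : (PySem.Str.len u == PySem.Str.len b) = true := by simpa using h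
    rw [ht, Bool.true_and]
  · unfold pvCheckA pvMatchesB
    rw [if_pos h]
    have ht : (PySem.Str.len u == PySem.Str.len b) = false := by simpa using h
    rw [ht, Bool.false_and]

-- A's inner user loop fills key b with a Set.update of the matching users
lemma pvInnerA_getD (b : String) (us : List String) :
  ∀ (tbl : PySem.Dict String (List String)) (b' : String),
    (us.foldl (fun tbl u =>
      if PySem.Str.len u ≠ PySem.Str.len b then tbl
      else if (tbl.getD b []).contains u then tbl
      else if pvCheckA u b then tbl.modify b [] (fun l => l ++ [u])
      else tbl) tbl).getD b' [] =
    if b' = b then PySem.Set.update (tbl.getD b []) (us.filter (fun u => pvCheckA u b))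
    else tbl.getD b' [] := by
  induction us with
  | nil =>
    intro tbl b'
    by_cases hb : b' = b
    · subst hb; simp [PySem.Set.update]
    · simp [hb]
  | cons u us' ih =>
    intro tbl b'
    simp only [List.foldl_cons, List.filter_cons]
    by_cases hlen : PySem.Str.len u ≠ PySem.Str.len b
    · rw [if_pos hlen, pvCheckA_len_ne hlen]
      simpa using ih tbl b'
    · rw [if_neg hlen]
      by_cases hchk : pvCheckA u b
      · rw [hchk]
        simp only [if_true]
        by_cases hc : (tbl.getD b []).contains u
        · rw [if_pos hc]
          have hmem : u ∈ tbl.getD b [] := by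
            have := hc; simpa [List.contains_iff_mem] using this
          rw [ih tbl b']
          congr 1
          rw [PySem.Set.update_cons, PySem.Set.add_of_mem hmem]
        · rw [if_neg hc]
          have hnmem : u ∉ tbl.getD b [] := by
            intro hm; exact hc (by simpa [List.contains_iff_mem] using hm)
          rw [ih _ b']
          by_cases hb : b' = b
          · rw [if_pos hb, if_pos hb]
            rw [PySem.Dict.getD_modify_self, PySem.Set.update_cons,
              PySem.Set.add_of_not_mem hnmem]
          · rw [if_neg hb, if_neg hb]
            rw [PySem.Dict.getD_modify]
            rw [if_neg hb]
      · rw [Bool.of_not_eq_true hchk]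
        simp only [if_false, Bool.false_eq_true, ite_self]
        exact ih tbl b'

-- A's table maps every banned pattern to set(matching users) in first-occurrence order
lemma pvTableA_getD (user_id : List String) : ∀ (banned : List String)
    (tbl : PySem.Dict String (List String)),
    (∀ c, tbl.getD c [] = [] ∨
      tbl.getD c [] = PySem.Set.ofList (user_id.filter (fun u => pvCheckA u c))) →
    ∀ b', (banned.foldl (fun tbl b =>
      let tbl := if (match tbl.get? b with | none => true | some l => l.isEmpty) then
          tbl.insert b ([] : List String) else tbl
      user_id.foldl (fun tbl u =>
        if PySem.Str.len u ≠ PySem.Str.len b then tbl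
        else if (tbl.getD b []).contains u then tbl
        else if pvCheckA u b then tbl.modify b [] (fun l => l ++ [u])
        else tbl) tbl) tbl).getD b' [] =
    if b' ∈ banned then PySem.Set.ofList (user_id.filter (fun u => pvCheckA u b'))
    else tbl.getD b' [] := by
  intro banned
  induction banned with
  | nil => intro tbl hinv b'; simp
  | cons b rest ih =>
    intro tbl hinv b'
    simp only [List.foldl_cons]
    have hb1 : (if (match tbl.get? b with | none => true | some l => l.isEmpty) then
          tbl.insert b ([] : List String) else tbl).getD b [] = [] ∨
        (if (match tbl.get? b with | none => true | some l => l.isEmpty) then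
          tbl.insert b ([] : List String) else tbl).getD b [] =
          PySem.Set.ofList (user_id.filter (fun u => pvCheckA u b)) := by
      cases hgb : tbl.get? b with
      | none => left; simp [PySem.Dict.getD_insert_self]
      | some l =>
        by_cases hl : l.isEmpty
        · left; simp [hl, PySem.Dict.getD_insert_self]
        · right
          rw [if_neg (by simpa using hl)]
          have hget : tbl.getD b [] = l := PySem.Dict.getD_of_get?_eq_some (d := tbl) [] hgb
          rcases hinv b with h0 | h0
          · exfalso; rw [hget] at h0; subst h0; simp at hl
          · exact h0
    have hkeep : ∀ c, c ≠ b → (if (match tbl.get? b with | none => true | some l => l.isEmpty) then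
          tbl.insert b ([] : List String) else tbl).getD c [] = tbl.getD c [] := by
      intro c hc
      by_cases hcond : (match tbl.get? b with | none => true | some l => l.isEmpty) = true
      · rw [if_pos hcond, PySem.Dict.getD_insert, if_neg hc]
      · rw [if_neg hcond]
    have h2 : ∀ b'', (user_id.foldl (fun (tbl : PySem.Dict String (List String)) u =>
        if PySem.Str.len u ≠ PySem.Str.len b then tbl
        else if (tbl.getD b []).contains u then tbl
        else if pvCheckA u b then tbl.modify b [] (fun l => l ++ [u])
        else tbl) (if (match tbl.get? b with | none => true | some l => l.isEmpty) then
          tbl.insert b ([] : List String) else tbl)).getD b'' [] =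
        if b'' = b then PySem.Set.ofList (user_id.filter (fun u => pvCheckA u b))
        else tbl.getD b'' [] := by
      intro b''
      rw [pvInnerA_getD b user_id _ b'']
      by_cases hbb : b'' = b
      · rw [if_pos hbb, if_pos hbb]
        rcases hb1 with h0 | h0
        · rw [h0, PySem.Set.update_nil_left]
        · rw [h0, PySem.Set.update_eq_append_filter]
          have hnil : (List.filter
              (fun y => !(PySem.Set.ofList (user_id.filter (fun u => pvCheckA u b))).contains y)
              (PySem.Set.ofList (user_id.filter (fun u => pvCheckA u b)))) = [] := by
            apply List.filter_eq_nil_iff.mpr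
            intro a ha
            simpa [PySem.Set.mem_ofList, List.mem_filter] using ha
          rw [hnil, List.append_nil]
      · rw [if_neg hbb, if_neg hbb, hkeep b'' hbb]
    rw [ih _ (by
      intro c
      rw [h2 c]
      by_cases hc : c = b
      · right; rw [if_pos hc, hc]
      · rw [if_neg hc]; exact hinv c)]
    by_cases hr : b' ∈ rest
    · rw [if_pos hr, if_pos (by simp [hr])]
    · rw [if_neg hr, h2 b']
      by_cases hbb : b' = b
      · subst hbb; simp
      · rw [if_neg hbb, if_neg (by simp [hbb, hr])]

-- B's table fold never erases a key
lemma pvFoldB_mono (user_id : List String) : ∀ (banned : List String)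
    (tbl : PySem.Dict String (List String)) (c : String), tbl.contains c = true →
    (banned.foldl (fun tbl b =>
      if tbl.contains b then tbl
      else tbl.insert b (PySem.List.dedup (user_id.filter (fun u => pvMatchesB u b)))) tbl).contains c = true := by
  intro banned
  induction banned with
  | nil => intro tbl c h; simpa using h
  | cons b rest ih =>
    intro tbl c h
    simp only [List.foldl_cons]
    by_cases hc : tbl.contains b
    · rw [if_pos hc]; exact ih tbl c h
    · rw [if_neg hc]
      exact ih _ c (by rw [PySem.Dict.contains_insert, h, Bool.or_true])

-- B's table maps every banned pattern to the deduped matching users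
lemma pvTableB_getD (user_id : List String) : ∀ (banned : List String)
    (tbl : PySem.Dict String (List String)),
    (∀ c, tbl.contains c = true →
      tbl.getD c [] = PySem.List.dedup (user_id.filter (fun u => pvMatchesB u c))) →
    (∀ c, (banned.foldl (fun tbl b =>
        if tbl.contains b then tbl
        else tbl.insert b (PySem.List.dedup (user_id.filter (fun u => pvMatchesB u b)))) tbl).contains c = true →
      (banned.foldl (fun tbl b =>
        if tbl.contains b then tbl
        else tbl.insert b (PySem.List.dedup (user_id.filter (fun u => pvMatchesB u b)))) tbl).getD c [] =
        PySem.List.dedup (user_id.filter (fun u => pvMatchesB u c))) ∧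
    (∀ b' ∈ banned, (banned.foldl (fun tbl b =>
        if tbl.contains b then tbl
        else tbl.insert b (PySem.List.dedup (user_id.filter (fun u => pvMatchesB u b)))) tbl).contains b' = true) := by
  intro banned
  induction banned with
  | nil => intro tbl hinv; exact ⟨hinv, by simp⟩
  | cons b rest ih =>
    intro tbl hinv
    simp only [List.foldl_cons]
    by_cases hc : tbl.contains b
    · rw [if_pos hc]
      refine ⟨(ih tbl hinv).1, ?_⟩
      intro b' hb'
      rcases List.mem_cons.mp hb' with h | h
      · subst h; exact pvFoldB_mono user_id rest tbl b' hc
      · exact (ih tbl hinv).2 b' h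
    · rw [if_neg hc]
      have hinv' : ∀ c, (tbl.insert b (PySem.List.dedup (user_id.filter (fun u => pvMatchesB u b)))).contains c = true →
          (tbl.insert b (PySem.List.dedup (user_id.filter (fun u => pvMatchesB u b)))).getD c [] =
          PySem.List.dedup (user_id.filter (fun u => pvMatchesB u c)) := by
        intro c hcc
        by_cases hcb : c = b
        · subst hcb; rw [PySem.Dict.getD_insert_self]
        · rw [PySem.Dict.getD_insert, if_neg hcb]
          apply hinv
          rw [PySem.Dict.contains_insert] at hcc
          simpa [hcb] using hcc
      refine ⟨(ih _ hinv').1, ?_⟩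
      intro b' hb'
      rcases List.mem_cons.mp hb' with h | h
      · subst h
        exact pvFoldB_mono user_id rest _ b'
          (by rw [PySem.Dict.contains_insert]; simp)
      · exact (ih _ hinv').2 b' h

-- membership in a frozen tuple equals membership in its element set
lemma pvContainsOfList (t : List String) (u : String) :
    PySem.Set.contains (PySem.Set.ofList t) u = t.contains u := by
  rw [Bool.eq_iff_iff]
  constructor
  · intro h
    exact List.contains_iff_mem.mpr ((PySem.Set.mem_ofList _ _).mp ((PySem.Set.contains_iff _ _).mp h))
  · intro h
    exact (PySem.Set.contains_iff _ _).mpr ((PySem.Set.mem_ofList _ _).mpr (List.contains_iff_mem.mp h))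

-- B's iterated product fold equals the recursive product
lemma pvProdFold (cand : String → List String) : ∀ (rem : List String) (ts : List (List String)),
    rem.foldl (fun ts b =>
      ts.flatMap (fun t => (cand b).flatMap
        (fun u => if t.contains u then [] else [t ++ [u]]))) ts
    = ts.flatMap (fun t => pvProdExt cand rem t) := by
  intro rem
  induction rem with
  | nil => intro ts; simp [pvProdExt]
  | cons b rest ih =>
    intro ts
    simp only [List.foldl_cons]
    rw [ih, List.flatMap_assoc]
    congr 1
    funext t
    rw [List.flatMap_assoc]
    show _ = pvProdExt cand (b :: rest) t
    unfold pvProdExt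
    congr 1
    funext u
    by_cases hm : u ∈ t
    · simp [hm]
    · have hcont : (t.contains u) = false := by simpa using hm
      simp only [hcont, Bool.false_eq_true, if_false, List.flatMap_cons,
        List.flatMap_nil, List.append_nil]
      cases rest <;> rfl

-- the frozensets of B's tuples are exactly the leaf sets of A's DFS, in the same order
lemma pvProdExt_map (cand1 cand2 : String → List String) : ∀ (rem : List String)
    (t : List String), t.Nodup → (∀ b ∈ rem, cand1 b = cand2 b) →
    (pvProdExt cand2 rem t).map PySem.Set.ofList =
      pvLeafSets cand1 rem (PySem.Set.ofList t) := by
  intro rem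
  induction rem with
  | nil => intro t _ _; simp [pvProdExt, pvLeafSets]
  | cons b rest ih =>
    intro t hnd hc
    unfold pvProdExt pvLeafSets
    rw [List.map_flatMap]
    rw [← hc b (List.mem_cons_self)]
    congr 1
    funext u
    rw [pvContainsOfList]
    by_cases hm : u ∈ t
    · simp [hm]
    · have hcont : (t.contains u) = false := by simpa using hm
      simp only [hcont, Bool.false_eq_true, if_false]
      rw [← PySem.Set.ofList_append_singleton]
      exact ih (t ++ [u])
        (hnd.append (List.nodup_singleton u)
          (fun {a} ha hb => hm ((List.mem_singleton.mp hb) ▸ ha)))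
        (fun b' hb' => hc b' (List.mem_cons_of_mem _ hb'))

lemma pvInsertAll_append (r : List (PySem.Set String)) (x y : List (PySem.Set String)) :
    pvInsertAll r (x ++ y) = pvInsertAll (pvInsertAll r x) y := by
  unfold pvInsertAll; rw [List.foldl_append]

-- A's dfs inserts all leaf sets into result, returning how many were new
lemma pvDfsA_eq (table : PySem.Dict String (List String)) (n : Int) : ∀ (rem : List String)
    (temp : PySem.Set String) (result : List (PySem.Set String)),
    (temp.length : Int) + (rem.length : Int) = n →
    pvDfsA table n rem temp result =
      (((pvInsertAll result (pvLeafSets (fun b => table.getD b []) rem temp)).length : Int)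
         - (result.length : Int),
       pvInsertAll result (pvLeafSets (fun b => table.getD b []) rem temp)) := by
  intro rem
  induction rem with
  | nil =>
    intro temp result hinv
    rw [pvDfsA]
    have hlen : (PySem.Set.len temp == n) = true := by
      simp only [PySem.Set.len]
      simp at hinv ⊢
      omega
    unfold pvLeafSets pvInsertAll
    simp only [List.foldl_cons, List.foldl_nil]
    by_cases hmem : result.any (fun s => PySem.Set.equal temp s)
    · rw [hlen, hmem]
      simp
    · rw [hlen, Bool.of_not_eq_true hmem]
      simp
  | cons b rest ih =>
    intro temp result hinv
    rw [pvDfsA]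
    have hlen : (PySem.Set.len temp == n) = false := by
      simp only [PySem.Set.len]
      simp at hinv ⊢
      omega
    rw [hlen, Bool.false_and, if_neg (by simp)]
    have hfor : ∀ (cands : List String) (result : List (PySem.Set String)),
        pvForA table n rest cands temp result =
          (((pvInsertAll result (cands.flatMap (fun c =>
              if PySem.Set.contains temp c then []
              else pvLeafSets (fun b => table.getD b []) rest (PySem.Set.add temp c)))).length : Int)
             - (result.length : Int),
           pvInsertAll result (cands.flatMap (fun c =>
              if PySem.Set.contains temp c then []
              else pvLeafSets (fun b => table.getD b []) rest (PySem.Set.add temp c)))) := by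
      intro cands
      induction cands with
      | nil => intro result; rw [pvForA]; simp [pvInsertAll]
      | cons c cs ihc =>
        intro result
        rw [pvForA]
        by_cases hcc : PySem.Set.contains temp c
        · rw [if_pos hcc, ihc result]
          have hmem : c ∈ temp := (PySem.Set.contains_iff _ _).mp hcc
          simp [hmem]
        · rw [if_neg hcc]
          have hnm : c ∉ temp := fun hm => hcc ((PySem.Set.contains_iff _ _).mpr hm)
          have hlen2 : ((PySem.Set.add temp c).length : Int) + (rest.length : Int) = n := by
            rw [PySem.Set.add_of_not_mem hnm]
            simp at hinv ⊢
            omega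
          rw [ih (PySem.Set.add temp c) result hlen2]
          simp only []
          rw [ihc _]
          simp only [hcc, Bool.false_eq_true, if_false, List.flatMap_cons]
          rw [pvInsertAll_append]
          simp only [Prod.mk.injEq]
          exact ⟨by omega, trivial⟩
    rw [hfor (table.getD b []) result]
    rfl

-- B's dedup loop over tuples is pvInsertAll over their frozensets
lemma pvFoldDistinct (ts : List (List String)) (r : List (PySem.Set String)) :
    ts.foldl (fun ds t =>
      let fs := PySem.Set.ofList t
      if ds.any (fun s => PySem.Set.equal fs s) then ds else ds ++ [fs]) r
    = pvInsertAll r (ts.map PySem.Set.ofList) := by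
  unfold pvInsertAll
  rw [List.foldl_map]

-- ===== VERDICT (by name: the statement is the Claim_ definition above) =====
theorem solution_spec : Claim_equal_solution := by
  intro user_id banned_id _dom
  unfold Spec_solution
  simp only [solution, solution_alt]
  rw [pvDfsA_eq _ _ banned_id PySem.Set.empty [] (by simp [PySem.Set.empty])]
  rw [pvProdFold, pvFoldDistinct]
  have htA := pvTableA_getD user_id banned_id PySem.Dict.empty (fun c => Or.inl (by simp))
  have htB := pvTableB_getD user_id banned_id PySem.Dict.empty (fun c hc => by simp at hc)
  have hcand : ∀ b ∈ banned_id,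
      (banned_id.foldl (fun tbl b =>
        let tbl := if (match tbl.get? b with | none => true | some l => l.isEmpty) then
            tbl.insert b ([] : List String) else tbl
        user_id.foldl (fun tbl u =>
          if PySem.Str.len u ≠ PySem.Str.len b then tbl
          else if (tbl.getD b []).contains u then tbl
          else if pvCheckA u b then tbl.modify b [] (fun l => l ++ [u])
          else tbl) tbl) PySem.Dict.empty).getD b [] =
      (banned_id.foldl (fun tbl b =>
        if tbl.contains b then tbl
        else tbl.insert b (PySem.List.dedup (user_id.filter (fun u => pvMatchesB u b)))) PySem.Dict.empty).getD b [] := by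
    intro b hb
    rw [htA b, if_pos hb, htB.1 b (htB.2 b hb)]
    rw [PySem.List.dedup_eq_ofList]
    congr 1
    apply List.filter_congr
    intro u _
    rw [pvCheckA_eq]
  have hmap := pvProdExt_map
    (fun b => (banned_id.foldl (fun tbl b =>
        let tbl := if (match tbl.get? b with | none => true | some l => l.isEmpty) then
            tbl.insert b ([] : List String) else tbl
        user_id.foldl (fun tbl u =>
          if PySem.Str.len u ≠ PySem.Str.len b then tbl
          else if (tbl.getD b []).contains u then tbl
          else if pvCheckA u b then tbl.modify b [] (fun l => l ++ [u])
          else tbl) tbl) PySem.Dict.empty).getD b [])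
    (fun b => (banned_id.foldl (fun tbl b =>
        if tbl.contains b then tbl
        else tbl.insert b (PySem.List.dedup (user_id.filter (fun u => pvMatchesB u b)))) PySem.Dict.empty).getD b [])
    banned_id [] List.nodup_nil hcand
  simp only [List.flatMap_cons, List.flatMap_nil, List.append_nil]
  rw [hmap]
  simp
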